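-- pv_equiv track=rewrite | github.com/ntgptit/memora | tool/frontend_guard/core.py | _is_ui_file
-- ===== SOURCE A (Python) =====
-- def _is_ui_file(relative_path: str) -> bool:
--     if not relative_path.startswith("lib/presentation/"):
--         return False
--
--     return any(
--         marker in relative_path
--         for marker in (
--             "/screens/",
--             "/widgets/",
--             "/layouts/",
--             "/primitives/",
--             "/composites/",
--         )
--     )
-- ===== SOURCE B (Python) =====
-- _UI_SET = {"screens", "widgets", "layouts", "primitives", "composites"}
--
--
-- def _is_ui_file(relative_path: str) -> bool:
--     if not relative_path.startswith("lib/presentation/"):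
--         return False
--
--     parts = relative_path.split("/")
--     return any(seg in _UI_SET for seg in parts[1:-1])
-- ===== Notes on version B (the rewrite author's own statement) =====
-- stated objective: idiomatic
-- what changed: Instead of scanning the whole path five times for slash-delimited marker substrings, B splits the path once into segments and tests each interior segment for membership in a prebuilt set of UI directory names.
import Mathlib
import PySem

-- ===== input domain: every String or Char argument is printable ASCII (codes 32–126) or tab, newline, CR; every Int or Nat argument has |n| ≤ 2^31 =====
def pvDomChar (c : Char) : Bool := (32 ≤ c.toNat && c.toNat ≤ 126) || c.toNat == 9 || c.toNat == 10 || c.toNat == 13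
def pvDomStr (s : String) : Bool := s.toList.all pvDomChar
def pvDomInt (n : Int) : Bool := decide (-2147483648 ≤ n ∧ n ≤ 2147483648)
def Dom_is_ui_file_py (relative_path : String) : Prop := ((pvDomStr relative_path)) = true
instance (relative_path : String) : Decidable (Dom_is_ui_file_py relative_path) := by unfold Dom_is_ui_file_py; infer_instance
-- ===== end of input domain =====

-- B replaces five whole-string substring scans by one split into path segments
-- plus set membership on the interior segments (idiomatic; same asymptotic cost).


-- ===== PORT A =====
def is_ui_file_py (relative_path : String) : Bool :=
  if !(PySem.Str.startswith relative_path "lib/presentation/") then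
    false
  else
    ["/screens/", "/widgets/", "/layouts/", "/primitives/", "/composites/"].any
      (fun marker => PySem.Str.isIn marker relative_path)

-- ===== PORT B =====
def pvUiSet : PySem.Set (List Char) :=
  PySem.Set.ofList
    ["screens".toList, "widgets".toList, "layouts".toList,
     "primitives".toList, "composites".toList]

def is_ui_file_py_alt (relative_path : String) : Bool :=
  if !(PySem.Str.startswith relative_path "lib/presentation/") then
    false
  else
    let parts := PySem.Chars.splitOn relative_path.toList "/".toList
    (PySem.List.slice parts (some 1) (some (-1))).any
      (fun seg => PySem.Set.contains pvUiSet seg)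

-- ===== PRECONDITION & SPEC =====
def Spec_is_ui_file_py (relative_path : String) (out : Bool) : Prop := out = is_ui_file_py_alt relative_path
instance (relative_path : String) (out : Bool) : Decidable (Spec_is_ui_file_py relative_path out) := by unfold Spec_is_ui_file_py; infer_instance

-- ===== CLAIM (what is proved, stated in full; the proofs are below) =====
def Claim_equal_is_ui_file_py : Prop := ∀ (relative_path : String), Dom_is_ui_file_py relative_path → Spec_is_ui_file_py relative_path (is_ui_file_py relative_path)

-- ===== LEMMAS AND PROOFS =====

-- proof-side model of str.split('/'): the segments between slashes, in order
def pvSeg : List Char → List (List Char)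
  | [] => [[]]
  | c :: r => if c = '/' then [] :: pvSeg r else (c :: (pvSeg r).headI) :: (pvSeg r).tail

theorem pvSeg_cons_slash (r : List Char) : pvSeg ('/' :: r) = [] :: pvSeg r := by
  show (if _ then _ else _) = _
  rw [if_pos rfl]

theorem pvSeg_cons_ne (c : Char) (r : List Char) (hc : c ≠ '/') :
    pvSeg (c :: r) = (c :: (pvSeg r).headI) :: (pvSeg r).tail := by
  show (if _ then _ else _) = _
  rw [if_neg hc]

theorem pvSeg_ne_nil (cs : List Char) : pvSeg cs ≠ [] := by
  cases cs with
  | nil => simp [pvSeg]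
  | cons c r => by_cases h : c = '/' <;> simp [pvSeg, h]

theorem pvSeg_headI_tail (l : List Char) : (pvSeg l).headI :: (pvSeg l).tail = pvSeg l := by
  cases h : pvSeg l with
  | nil => exact absurd h (pvSeg_ne_nil l)
  | cons x u => simp

theorem pvGo_eq (fuel : Nat) (l cur : List Char) (acc : List (List Char))
    (h : l.length < fuel) :
    PySem.Chars.splitOn.go ['/'] fuel l cur acc
      = acc.reverse ++ (cur.reverse ++ (pvSeg l).headI) :: (pvSeg l).tail := by
  induction fuel generalizing l cur acc with
  | zero => omega
  | succ f ih =>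
    cases l with
    | nil => simp [PySem.Chars.splitOn.go, pvSeg]
    | cons c r =>
      by_cases hc : c = '/'
      · subst hc
        rw [show PySem.Chars.splitOn.go ['/'] (f+1) ('/' :: r) cur acc
              = PySem.Chars.splitOn.go ['/'] f (List.drop ['/'].length ('/' :: r)) [] (cur.reverse :: acc) by
            simp [PySem.Chars.splitOn.go, List.isPrefixOf]]
        rw [ih (List.drop ['/'].length ('/' :: r)) [] (cur.reverse :: acc) (by simp at h ⊢; omega)]
        simp [pvSeg_cons_slash, pvSeg_headI_tail]
      · rw [show PySem.Chars.splitOn.go ['/'] (f+1) (c :: r) cur acc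
              = PySem.Chars.splitOn.go ['/'] f r (c :: cur) acc by
            simp [PySem.Chars.splitOn.go, List.isPrefixOf, Ne.symm hc]]
        rw [ih r (c :: cur) acc (by simp at h ⊢; omega)]
        simp [pvSeg_cons_ne c r hc]

theorem pvSplitOn_eq_seg (cs : List Char) :
    PySem.Chars.splitOn cs "/".toList = pvSeg cs := by
  show PySem.Chars.splitOn.go _ _ _ _ _ = _
  rw [show ("/".toList) = ['/'] from rfl]
  rw [pvGo_eq (cs.length + 1) cs [] [] (by omega)]
  cases h : pvSeg cs with
  | nil => exact absurd h (pvSeg_ne_nil cs)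
  | cons a t => simp

-- xs[1:-1] = drop the first and the last element
theorem pvSlice_one_neg_one {α : Type} (xs : List α) :
    PySem.List.slice xs (some 1) (some (-1)) = (xs.drop 1).dropLast := by
  cases xs with
  | nil => simp [PySem.List.slice, PySem.List.clampIdx]
  | cons a t =>
    simp only [PySem.List.slice, PySem.List.clampIdx]
    rw [List.dropLast_eq_take]
    have h1 : ¬ ((1 : Int) < 0) := by norm_num
    simp only [h1, if_false, List.length_cons]
    by_cases ht : t.length = 0
    · cases t with
      | nil => simp
      | cons b u => simp at ht
    · have h2 : ¬ (((t.length + 1 : Nat) : Int) + (-1) < 0) := by push_cast; omega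
      simp only [h2, if_false]
      have e1 : (((t.length + 1 : Nat) : Int) + (-1)).toNat = t.length := by push_cast; omega
      have e2 : min (1 : Int).toNat (t.length + 1) = 1 := by omega
      rw [e1, e2]
      simp

def pvInterior (xs : List (List Char)) : List (List Char) := (xs.drop 1).dropLast

-- prefixing a slash-free run a: first segment grows, the rest unchanged
theorem pvSeg_append (a r : List Char) (ha : '/' ∉ a) :
    pvSeg (a ++ r) = (a ++ (pvSeg r).headI) :: (pvSeg r).tail := by
  induction a with
  | nil =>
    cases h : pvSeg r with
    | nil => exact absurd h (pvSeg_ne_nil r)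
    | cons x t => simp [h]
  | cons c a ih =>
    have hc : c ≠ '/' := fun h => ha (h ▸ List.mem_cons_self)
    have ha' : '/' ∉ a := fun h => ha (List.mem_cons_of_mem _ h)
    rw [List.cons_append, pvSeg_cons_ne c (a ++ r) hc, ih ha']
    simp

-- a non-last segment h of pvSeg r is followed by a slash in r
theorem pvSeg_head_split (r : List Char) :
    ∀ h t, pvSeg r = h :: t → t ≠ [] → ∃ b, r = h ++ '/' :: b := by
  induction r with
  | nil => intro h t he hne; simp [pvSeg] at he; simp [he.2] at hne
  | cons c r ih =>
    intro h t he hne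
    by_cases hc : c = '/'
    · subst hc
      rw [pvSeg_cons_slash] at he
      exact ⟨r, by simp [← (List.cons.injEq _ _ _ _ ▸ he).1]⟩
    · rw [pvSeg_cons_ne c r hc] at he
      cases hs : pvSeg r with
      | nil => exact absurd hs (pvSeg_ne_nil r)
      | cons x u =>
        rw [hs] at he
        simp only [List.headI, List.tail, List.cons.injEq] at he
        obtain ⟨hh, ht⟩ := he
        obtain ⟨b, hb⟩ := ih x u hs (ht ▸ hne)
        exact ⟨b, by simp [hb, ← hh]⟩

theorem pvMem_dropLast_drop {α : Type} (l : List α) (x : α)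
    (h : x ∈ (l.drop 1).dropLast) : x ∈ l.dropLast := by
  cases l with
  | nil => simpa using h
  | cons a t =>
    cases t with
    | nil => simpa using h
    | cons b u =>
      rw [List.dropLast_cons_of_ne_nil (by simp)]
      simp only [List.drop_one, List.tail_cons] at h
      exact List.mem_cons_of_mem _ h

-- interior segment → the path decomposes around it
theorem pvInterior_to_decomp (cs m : List Char) :
    m ∈ pvInterior (pvSeg cs) → ∃ a b, cs = a ++ '/' :: (m ++ '/' :: b) := by
  induction cs with
  | nil => simp [pvSeg, pvInterior]
  | cons c r ih =>
    intro hm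
    by_cases hc : c = '/'
    · subst hc
      rw [pvSeg_cons_slash] at hm
      simp only [pvInterior, List.drop_one, List.tail_cons] at hm
      cases hs : pvSeg r with
      | nil => exact absurd hs (pvSeg_ne_nil r)
      | cons x u =>
        rw [hs] at hm
        cases hu : u with
        | nil => rw [hu] at hm; simp at hm
        | cons y v =>
          rw [hu] at hm
          rw [List.dropLast_cons_of_ne_nil (by simp)] at hm
          rcases List.mem_cons.mp hm with h1 | h2
          · subst h1
            obtain ⟨b, hb⟩ := pvSeg_head_split r m u hs (by simp [hu])
            exact ⟨[], b, by simp [hb]⟩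
          · have : m ∈ pvInterior (pvSeg r) := by
              simp [pvInterior, hs, hu, h2]
            obtain ⟨a, b, hab⟩ := ih this
            exact ⟨'/' :: a, b, by simp [hab]⟩
    · rw [pvSeg_cons_ne c r hc] at hm
      simp only [pvInterior, List.drop_one, List.tail_cons] at hm
      have : m ∈ pvInterior (pvSeg r) := by
        cases hs : pvSeg r with
        | nil => exact absurd hs (pvSeg_ne_nil r)
        | cons x u => rw [hs] at hm; simp [pvInterior] at hm; exact hm
      obtain ⟨a, b, hab⟩ := ih this
      exact ⟨c :: a, b, by simp [hab]⟩

-- decomposition → interior segment (m slash-free)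
theorem pvDecomp_to_interior (m : List Char) (hm : '/' ∉ m) (a b : List Char) :
    m ∈ pvInterior (pvSeg (a ++ '/' :: (m ++ '/' :: b))) := by
  induction a with
  | nil =>
    have h1 : pvSeg (m ++ '/' :: b) = (m ++ []) :: pvSeg b := by
      rw [pvSeg_append m ('/' :: b) hm]
      rw [pvSeg_cons_slash]
      cases hb : pvSeg b with
      | nil => exact absurd hb (pvSeg_ne_nil b)
      | cons x u => simp
    have h2 : pvSeg ([] ++ '/' :: (m ++ '/' :: b)) = [] :: (m ++ []) :: pvSeg b := by
      simp only [List.nil_append]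
      rw [pvSeg_cons_slash, h1]
    rw [h2]
    simp only [pvInterior, List.drop_one, List.tail_cons]
    rw [List.dropLast_cons_of_ne_nil (pvSeg_ne_nil b)]
    simp
  | cons c a ih =>
    by_cases hc : c = '/'
    · subst hc
      have h3 : pvSeg ('/' :: a ++ '/' :: (m ++ '/' :: b))
          = [] :: pvSeg (a ++ '/' :: (m ++ '/' :: b)) := by
        rw [List.cons_append, pvSeg_cons_slash]
      rw [h3]
      simp only [pvInterior, List.drop_one, List.tail_cons]
      exact pvMem_dropLast_drop _ _ (by simpa [pvInterior, List.drop_one] using ih)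
    · have h4 : pvSeg (c :: a ++ '/' :: (m ++ '/' :: b))
          = (c :: (pvSeg (a ++ '/' :: (m ++ '/' :: b))).headI)
            :: (pvSeg (a ++ '/' :: (m ++ '/' :: b))).tail := by
        rw [List.cons_append, pvSeg_cons_ne _ _ hc]
      rw [h4]
      simp only [pvInterior, List.drop_one, List.tail_cons]
      cases hs : pvSeg (a ++ '/' :: (m ++ '/' :: b)) with
      | nil => exact absurd hs (pvSeg_ne_nil _)
      | cons x u =>
        have := ih
        simp only [pvInterior, hs, List.drop_one, List.tail_cons] at this
        simpa using this

-- the key bridge: "/m/" is a substring iff m is an interior segment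
theorem pvKey (m : List Char) (hm : '/' ∉ m) (cs : List Char) :
    ('/' :: (m ++ ['/'])) <:+: cs ↔ m ∈ pvInterior (pvSeg cs) := by
  constructor
  · rintro ⟨u, v, rfl⟩
    have he : u ++ '/' :: (m ++ ['/']) ++ v = u ++ '/' :: (m ++ '/' :: v) := by simp
    rw [he]
    exact pvDecomp_to_interior m hm u v
  · intro h
    obtain ⟨a, b, rfl⟩ := pvInterior_to_decomp cs m h
    exact ⟨a, b, by simp⟩

theorem pvMarker (mk : String) (m : List Char) (hmk : mk.toList = '/' :: (m ++ ['/']))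
    (hm : '/' ∉ m) (s : String) :
    PySem.Str.isIn mk s = true ↔ m ∈ pvInterior (pvSeg s.toList) := by
  rw [PySem.Str.isIn_iff_infix, hmk]
  exact pvKey m hm _

theorem pvMain (s : String) : is_ui_file_py s = is_ui_file_py_alt s := by
  unfold is_ui_file_py is_ui_file_py_alt
  cases hsw : PySem.Str.startswith s "lib/presentation/" with
  | false => simp
  | true =>
    simp only [Bool.not_true, Bool.false_eq_true, if_false]
    rw [pvSplitOn_eq_seg, pvSlice_one_neg_one]
    have hset : pvUiSet = ["screens".toList, "widgets".toList, "layouts".toList,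
        "primitives".toList, "composites".toList] := by decide
    rw [Bool.eq_iff_iff]
    simp only [List.any_cons, List.any_nil, Bool.or_eq_true, Bool.or_false,
      List.any_eq_true, hset, PySem.Set.contains, List.contains_eq_mem,
      decide_eq_true_eq, List.mem_cons, List.not_mem_nil, or_false,
      pvMarker "/screens/" "screens".toList rfl (by decide) s,
      pvMarker "/widgets/" "widgets".toList rfl (by decide) s,
      pvMarker "/layouts/" "layouts".toList rfl (by decide) s,
      pvMarker "/primitives/" "primitives".toList rfl (by decide) s,
      pvMarker "/composites/" "composites".toList rfl (by decide) s]
    constructor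
    · rintro (h | h | h | h | h)
      · exact ⟨_, h, Or.inl rfl⟩
      · exact ⟨_, h, Or.inr (Or.inl rfl)⟩
      · exact ⟨_, h, Or.inr (Or.inr (Or.inl rfl))⟩
      · exact ⟨_, h, Or.inr (Or.inr (Or.inr (Or.inl rfl)))⟩
      · exact ⟨_, h, Or.inr (Or.inr (Or.inr (Or.inr rfl)))⟩
    · rintro ⟨g, hg, rfl | rfl | rfl | rfl | rfl⟩
      · exact Or.inl hg
      · exact Or.inr (Or.inl hg)
      · exact Or.inr (Or.inr (Or.inl hg))
      · exact Or.inr (Or.inr (Or.inr (Or.inl hg)))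
      · exact Or.inr (Or.inr (Or.inr (Or.inr hg)))

-- ===== VERDICT (by name: the statement is the Claim_ definition above) =====
theorem is_ui_file_py_spec : Claim_equal_is_ui_file_py := by
  intro s _
  unfold Spec_is_ui_file_py
  exact pvMain s
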